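-- pv_equiv track=rewrite | github.com/Sangmin-Jeon/Problem_Solving | 프로그래머스/1/42840. 모의고사/모의고사.py | solution
-- ===== SOURCE A (Python) =====
-- def solution(answers):
--     answer = []
--     method_1 = [1, 2, 3, 4, 5]
--     method_2 = [2, 1, 2, 3, 2, 4, 2, 5]
--     method_3 = [3, 3, 1, 1, 2, 2, 4, 4, 5, 5]
--
--     stu_1 = stu_2 = stu_3 = 0
--
--     for i in range(len(answers)):
--         if answers[i] == method_1[i % len(method_1)]:
--             stu_1 += 1
--         if answers[i] == method_2[i % len(method_2)]:
--             stu_2 += 1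
--         if answers[i] == method_3[i % len(method_3)]:
--             stu_3 += 1
--
--     max_score = max(stu_1, stu_2, stu_3)
--     if stu_1 == max_score:
--         answer.append(1)
--     if stu_2 == max_score:
--         answer.append(2)
--     if stu_3 == max_score:
--         answer.append(3)
--
--     return answer
-- ===== SOURCE B (Python) =====
-- def solution(answers):
--     patterns = [
--         [1, 2, 3, 4, 5],
--         [2, 1, 2, 3, 2, 4, 2, 5],
--         [3, 3, 1, 1, 2, 2, 4, 4, 5, 5],
--     ]
--     # One pass: histogram of (position mod 40, answer value); 40 = lcm of the
--     # pattern lengths, so each pattern is constant on a residue class mod 40.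
--     hist = {}
--     for i, a in enumerate(answers):
--         key = (i % 40, a)
--         hist[key] = hist.get(key, 0) + 1
--     # Each score is then 40 table lookups, independent of len(answers).
--     scores = []
--     for p in patterns:
--         s = 0
--         for r in range(40):
--             s += hist.get((r, p[r % len(p)]), 0)
--         scores.append(s)
--     m = max(scores)
--     return [i + 1 for i, s in enumerate(scores) if s == m]
-- ===== Notes on version B (the rewrite author's own statement) =====
-- stated objective: alternative
-- what changed: Replaces A's per-element parallel scan with three named counters by a histogram: one pass counts (index mod 40, answer) pairs in a dict (40 = lcm of the pattern lengths), each pattern's score is then read off with 40 table lookups, and max plus a comprehension pick the winners.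
import Mathlib
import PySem

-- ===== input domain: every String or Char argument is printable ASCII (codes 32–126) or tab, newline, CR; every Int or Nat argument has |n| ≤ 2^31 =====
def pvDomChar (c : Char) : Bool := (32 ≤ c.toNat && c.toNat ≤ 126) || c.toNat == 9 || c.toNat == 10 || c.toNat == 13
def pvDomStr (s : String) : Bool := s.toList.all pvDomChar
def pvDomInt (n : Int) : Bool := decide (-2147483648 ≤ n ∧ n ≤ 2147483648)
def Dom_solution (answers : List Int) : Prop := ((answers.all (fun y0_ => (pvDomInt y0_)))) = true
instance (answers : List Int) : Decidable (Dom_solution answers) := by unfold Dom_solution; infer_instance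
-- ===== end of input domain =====

-- B replaces A's per-element parallel scan (three named counters bumped for every
-- answer) by a histogram: one pass builds a dict counting (index mod 40, answer)
-- pairs — 40 = lcm of the pattern lengths — and each pattern's score is then read
-- off with 40 table lookups; max and a comprehension pick the winners (objective:
-- alternative).

-- ===== PORT A =====
def solution (answers : List Int) : List Int :=
  let method_1 : List Int := [1, 2, 3, 4, 5]
  let method_2 : List Int := [2, 1, 2, 3, 2, 4, 2, 5]
  let method_3 : List Int := [3, 3, 1, 1, 2, 2, 4, 4, 5, 5]
  let st :=
    (PySem.List.pyRange 0 (answers.length : Int) 1).foldl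
      (fun (st : Int × Int × Int) i =>
        let s1 := if PySem.List.pyGetD answers i 0
                     = PySem.List.pyGetD method_1 (PySem.Int.mod i (method_1.length : Int)) 0
                  then st.1 + 1 else st.1
        let s2 := if PySem.List.pyGetD answers i 0
                     = PySem.List.pyGetD method_2 (PySem.Int.mod i (method_2.length : Int)) 0
                  then st.2.1 + 1 else st.2.1
        let s3 := if PySem.List.pyGetD answers i 0
                     = PySem.List.pyGetD method_3 (PySem.Int.mod i (method_3.length : Int)) 0
                  then st.2.2 + 1 else st.2.2
        (s1, s2, s3))
      ((0 : Int), (0 : Int), (0 : Int))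
  let max_score := max st.1 (max st.2.1 st.2.2)
  ((if st.1 = max_score then [(1 : Int)] else []) ++
   (if st.2.1 = max_score then [(2 : Int)] else []) ++
   (if st.2.2 = max_score then [(3 : Int)] else []))

-- ===== PORT B =====
def solution_alt (answers : List Int) : List Int :=
  let patterns : List (List Int) :=
    [[1, 2, 3, 4, 5], [2, 1, 2, 3, 2, 4, 2, 5], [3, 3, 1, 1, 2, 2, 4, 4, 5, 5]]
  -- one pass: histogram of (i % 40, a) pairs
  let hist : PySem.Dict (Int × Int) Int :=
    (PySem.List.enumerate answers 0).foldl
      (fun d ia =>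
        let key := (PySem.Int.mod ia.1 40, ia.2)
        d.insert key (d.getD key 0 + 1))
      PySem.Dict.empty
  -- each score: 40 table lookups ('for r in range(40): s += hist.get(...)')
  let scores := patterns.map (fun p =>
    (PySem.List.pyRange 0 40 1).foldl
      (fun s r =>
        s + hist.getD (r, PySem.List.pyGetD p (PySem.Int.mod r (p.length : Int)) 0) 0)
      0)
  let m := (PySem.List.max? scores (fun y => y)).getD 0
  (PySem.List.enumerate scores 0).foldl
    (fun acc is => if is.2 = m then acc ++ [is.1 + 1] else acc) []

-- ===== PRECONDITION & SPEC =====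
def Spec_solution (answers : List Int) (out : List Int) : Prop := out = solution_alt answers
instance (answers : List Int) (out : List Int) : Decidable (Spec_solution answers out) := by unfold Spec_solution; infer_instance

-- ===== CLAIM (what is proved, stated in full; the proofs are below) =====
def Claim_equal_solution : Prop := ∀ (answers : List Int), Dom_solution answers → Spec_solution answers (solution answers)

-- ===== LEMMAS AND PROOFS =====

-- the number of positions where 'answers' agrees with the cyclic pattern p
def countM (p answers : List Int) : Nat :=
  List.countP
    (fun i => decide (PySem.List.pyGetD answers i 0
                        = PySem.List.pyGetD p (PySem.Int.mod i (p.length : Int)) 0))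
    (PySem.List.pyRange 0 (answers.length : Int) 1)

-- A's per-pattern counter loop computes countM
theorem counter_eq_countM (p answers : List Int) :
    (PySem.List.pyRange 0 (answers.length : Int) 1).foldl
      (fun acc i =>
        if PySem.List.pyGetD answers i 0
             = PySem.List.pyGetD p (PySem.Int.mod i (p.length : Int)) 0
        then acc + 1 else acc) 0
      = (countM p answers : Int) := by
  have h := PySem.List.foldl_count_if
    (fun i => decide (PySem.List.pyGetD answers i 0
                        = PySem.List.pyGetD p (PySem.Int.mod i (p.length : Int)) 0))
    (PySem.List.pyRange 0 (answers.length : Int) 1) 0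
  simp only [decide_eq_true_eq, zero_add] at h
  simpa [countM] using h

-- split A's triple-state fold into the three independent counter folds
theorem triple_fold_split (l : List Int) (f g h : Int → Int → Int)
    (a b c : Int) :
    l.foldl (fun (st : Int × Int × Int) i => (f st.1 i, g st.2.1 i, h st.2.2 i)) (a, b, c)
      = (l.foldl f a, l.foldl g b, l.foldl h c) := by
  induction l generalizing a b c with
  | nil => rfl
  | cons x t ih => simp [List.foldl, ih]

-- a 0/1 indicator summed over range(40): picks out the unique r = q
theorem countP_pair_range (f : Int → Int) (q x : Int) (h0 : 0 ≤ q) (h1 : q < 40) :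
    (List.countP (fun r => decide ((r, f r) = (q, x))) (PySem.List.pyRange 0 40 1) : Int)
      = if x = f q then 1 else 0 := by
  by_cases hx : x = f q
  · rw [List.countP_congr (q := fun r => r == q)
      (by intro r _; simp [Prod.ext_iff]; intro h; subst h; simp [hx])]
    rw [show List.countP (fun r => r == q) (PySem.List.pyRange 0 40 1)
          = List.count q (PySem.List.pyRange 0 40 1) from rfl,
      List.count_eq_one_of_mem (PySem.List.nodup_pyRange_one 0 40)
      ((PySem.List.mem_pyRange_one).2 ⟨h0, h1⟩)]
    simp [hx]
  · rw [List.countP_eq_zero.2 (by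
      intro r _; simp [Prod.ext_iff]; intro h; subst h
      exact fun h' => hx h'.symm)]
    simp [hx]

-- summing per-residue counts over range(40) counts the matching pairs
theorem sum_count_eq_countP (l : List (Int × Int)) (f : Int → Int)
    (h : ∀ k ∈ l, 0 ≤ k.1 ∧ k.1 < 40) :
    ((PySem.List.pyRange 0 40 1).map (fun r => (List.count (r, f r) l : Int))).sum
      = (List.countP (fun k => decide (k.2 = f k.1)) l : Int) := by
  induction l with
  | nil => simp
  | cons k t ih =>
    have hk := h k (List.mem_cons_self)
    have ht : ∀ k' ∈ t, 0 ≤ k'.1 ∧ k'.1 < 40 := fun k' hk' => h k' (List.mem_cons_of_mem _ hk')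
    have hcnt : ∀ r : Int, (List.count (r, f r) (k :: t) : Int)
        = (List.count (r, f r) t : Int) + (if (r, f r) = k then 1 else 0) := by
      intro r; rw [List.count_cons]; push_cast
      simp only [beq_iff_eq]
      by_cases hkr : (r, f r) = k
      · rw [if_pos hkr.symm, if_pos hkr]
      · rw [if_neg (fun h => hkr h.symm), if_neg hkr]
    simp only [hcnt]
    rw [PySem.List.sum_map_add_int, ih ht]
    have : ((PySem.List.pyRange 0 40 1).map
        (fun r => if (r, f r) = k then (1 : Int) else 0)).sum
        = (List.countP (fun r => decide ((r, f r) = (k.1, k.2))) (PySem.List.pyRange 0 40 1) : Int) := by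
      rw [← PySem.List.sum_map_ite_one_zero (fun r => decide ((r, f r) = (k.1, k.2)))]
      simp
    rw [this, countP_pair_range f k.1 k.2 hk.1 hk.2, List.countP_cons]
    push_cast
    simp [eq_comm]

-- mod 40 then mod c (c ∣ 40) is mod c
theorem mod_mod_forty (i c : Int) (hc : 0 < c) (hdvd : c ∣ 40) :
    PySem.Int.mod (PySem.Int.mod i 40) c = PySem.Int.mod i c := by
  rw [PySem.Int.mod_eq_emod_of_pos hc, PySem.Int.mod_eq_emod_of_pos hc,
    PySem.Int.mod_eq_emod_of_pos (by norm_num : (0:Int) < 40),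
    Int.emod_emod_of_dvd _ hdvd]

-- B's per-pattern 40-lookup loop over the histogram computes countM
theorem score_alt_eq_countM (answers p : List Int) (hc : 0 < (p.length : Int))
    (hdvd : (p.length : Int) ∣ 40) :
    (PySem.List.pyRange 0 40 1).foldl
      (fun s r =>
        s + ((PySem.List.enumerate answers 0).foldl
              (fun d ia =>
                d.insert (PySem.Int.mod ia.1 40, ia.2)
                  (d.getD (PySem.Int.mod ia.1 40, ia.2) 0 + 1))
              (PySem.Dict.empty : PySem.Dict (Int × Int) Int)).getD
            (r, PySem.List.pyGetD p (PySem.Int.mod r (p.length : Int)) 0) 0)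
      0
      = (countM p answers : Int) := by
  -- the histogram loop is a counting fold over the key list
  have hfold : (PySem.List.enumerate answers 0).foldl
      (fun d ia =>
        d.insert (PySem.Int.mod ia.1 40, ia.2)
          (d.getD (PySem.Int.mod ia.1 40, ia.2) 0 + 1))
      (PySem.Dict.empty : PySem.Dict (Int × Int) Int)
      = ((PySem.List.enumerate answers 0).map
          (fun ia => (PySem.Int.mod ia.1 40, ia.2))).foldl
          (fun d k => d.insert k (d.getD k 0 + 1)) PySem.Dict.empty := by
    rw [List.foldl_map]
  simp only [hfold, PySem.Dict.getD_foldl_insert_add_one, PySem.Dict.getD_empty, zero_add]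
  rw [PySem.List.foldl_add, zero_add]
  rw [sum_count_eq_countP _ (fun r => PySem.List.pyGetD p (PySem.Int.mod r (p.length : Int)) 0)
    (by
      intro k hk
      simp only [List.mem_map] at hk
      obtain ⟨ia, _, rfl⟩ := hk
      exact ⟨PySem.Int.mod_nonneg _ (by norm_num), PySem.Int.mod_lt _ (by norm_num)⟩)]
  rw [List.countP_map]
  have hcong : ∀ ia ∈ PySem.List.enumerate answers 0,
      ((fun k : Int × Int => decide (k.2 = PySem.List.pyGetD p (PySem.Int.mod k.1 (p.length : Int)) 0))
        ∘ fun ia : Int × Int => (PySem.Int.mod ia.1 40, ia.2)) ia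
      = decide (ia.2 = PySem.List.pyGetD p (PySem.Int.mod ia.1 (p.length : Int)) 0) := by
    intro ia _
    simp only [Function.comp_apply]
    rw [mod_mod_forty ia.1 _ hc hdvd]
  rw [List.countP_congr (fun x hx => by rw [hcong x hx])]
  -- enumerate is the indexed view of answers
  rw [PySem.List.enumerate_eq_map_pyRange answers 0, List.countP_map]
  simp only [Function.comp_def, countM, PySem.List.len]

-- assembling the winner list: A's three ifs = B's enumerate fold over the scores
theorem final_step (s1 s2 s3 : Int) :
    ((if s1 = max s1 (max s2 s3) then [(1 : Int)] else []) ++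
     (if s2 = max s1 (max s2 s3) then [(2 : Int)] else []) ++
     (if s3 = max s1 (max s2 s3) then [(3 : Int)] else []))
    = (PySem.List.enumerate [s1, s2, s3] 0).foldl
        (fun acc is =>
          if is.2 = (PySem.List.max? [s1, s2, s3] (fun y => y)).getD 0
          then acc ++ [is.1 + 1] else acc) [] := by
  simp only [PySem.List.max?_id_cons, List.foldl, PySem.List.enumerate_cons,
    PySem.List.enumerate_nil, Option.getD_some]
  rw [max_assoc]
  norm_num
  split_ifs <;> simp

-- ===== VERDICT (by name: the statement is the Claim_ definition above) =====
theorem solution_spec : Claim_equal_solution := by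
  intro answers _
  unfold Spec_solution solution solution_alt
  simp only [List.map]
  rw [triple_fold_split _
        (fun c i => if PySem.List.pyGetD answers i 0
            = PySem.List.pyGetD [1, 2, 3, 4, 5] (PySem.Int.mod i (([(1:Int), 2, 3, 4, 5].length : Int))) 0
          then c + 1 else c)
        (fun c i => if PySem.List.pyGetD answers i 0
            = PySem.List.pyGetD [2, 1, 2, 3, 2, 4, 2, 5] (PySem.Int.mod i (([(2:Int), 1, 2, 3, 2, 4, 2, 5].length : Int))) 0
          then c + 1 else c)
        (fun c i => if PySem.List.pyGetD answers i 0
            = PySem.List.pyGetD [3, 3, 1, 1, 2, 2, 4, 4, 5, 5] (PySem.Int.mod i (([(3:Int), 3, 1, 1, 2, 2, 4, 4, 5, 5].length : Int))) 0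
          then c + 1 else c)]
  simp only [counter_eq_countM]
  simp only [score_alt_eq_countM answers [1, 2, 3, 4, 5] (by norm_num) (by norm_num),
      score_alt_eq_countM answers [2, 1, 2, 3, 2, 4, 2, 5] (by norm_num) (by norm_num),
      score_alt_eq_countM answers [3, 3, 1, 1, 2, 2, 4, 4, 5, 5] (by norm_num) (by norm_num)]
  exact final_step _ _ _
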